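-- pv_equiv track=rewrite | github.com/shutakahama/twitter_draft_ocr | functions.py | append_string
-- ===== SOURCE A (Python) =====
-- def levenshtein(s1, s2):
--     n, m = len(s1), len(s2)
--     dp = [[0] * (m + 1) for _ in range(n + 1)]
--
--     for i in range(n + 1):
--         dp[i][0] = i
--     for j in range(m + 1):
--         dp[0][j] = j
--
--     for i in range(1, n + 1):
--         for j in range(1, m + 1):
--             cost = 0 if s1[i - 1] == s2[j - 1] else 1
--             dp[i][j] = min(dp[i - 1][j] + 1,         # insertion
--                            dp[i][j - 1] + 1,         # deletion
--                            dp[i - 1][j - 1] + cost)  # replacement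
--
--     return dp[n][m]
--
-- def append_string(draft_list, new_str, min_length=10, search_num=10):
--     # new_strがあまりに短すぎる場合は追加しない
--     if len(new_str) < min_length:
--         return draft_list
--     # 一致判定の精度を上げるため空白は除く
--     new_str = new_str.replace(" ", "")
--
--     # 短い方(s2)が長い方(s1)のprefixまたはsuffixに一致するかを判定する
--     def check_duplicate(s1, s2):
--         return (levenshtein(s1[:len(s2)], s2) <= 0.5 * len(s2) or
--                 levenshtein(s1[-len(s2):], s2) <= 0.5 * len(s2))
--
--     str_to_remove = []
--     # draft_listの末尾search_num個を調査
--     for s in draft_list[-search_num:]: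
--         # もしnew_strと一致してより長い文章が既にdraft_listにある場合、
--         # new_strは追加するのを止める
--         if len(s) >= len(new_str) and check_duplicate(s, new_str):
--             return draft_list
--         # もしnew_strと一致してより短い文章が既にdraft_listにある場合、
--         # new_strを採用してdraft_listにある方を削除する
--         elif len(s) < len(new_str) and check_duplicate(new_str, s):
--             str_to_remove.append(s)
--
--     for s in str_to_remove:
--         draft_list.remove(s)
--     draft_list.append(new_str)
--
--     return draft_list
-- ===== SOURCE B (Python) =====
-- # B: demand-driven Levenshtein -- top-down over the dependency DAG with an
-- # explicit worklist stack and a dict memo (instead of A's bottom-up fill of a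
-- # preallocated (n+1)x(m+1) matrix), plus a two-phase glue (any() scan, then a
-- # filter of the shorter near-duplicates). Like A, this mutates draft_list in
-- # place (remove/append) and returns it; equivalence is about the return value.
--
-- def _lev(s1, s2):
--     memo = {}
--     stack = [(len(s1), len(s2), False)]
--     while stack:
--         i, j, ready = stack.pop()
--         if (i, j) in memo:
--             continue
--         if i == 0:
--             memo[(i, j)] = j
--         elif j == 0:
--             memo[(i, j)] = i
--         elif ready:
--             cost = 0 if s1[i - 1] == s2[j - 1] else 1
--             memo[(i, j)] = min(memo[(i - 1, j)] + 1,
--                                memo[(i, j - 1)] + 1,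
--                                memo[(i - 1, j - 1)] + cost)
--         else:
--             stack.append((i, j, True))
--             stack.append((i - 1, j, False))
--             stack.append((i, j - 1, False))
--             stack.append((i - 1, j - 1, False))
--     return memo[(len(s1), len(s2))]
--
--
-- def _near(s1, s2):
--     # s2 (the shorter) matches a prefix or suffix of s1 within half its length
--     return (_lev(s1[:len(s2)], s2) <= 0.5 * len(s2) or
--             _lev(s1[-len(s2):], s2) <= 0.5 * len(s2))
--
--
-- def append_string(draft_list, new_str, min_length=10, search_num=10):
--     if len(new_str) < min_length:
--         return draft_list
--     new_str = new_str.replace(" ", "")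
--
--     window = draft_list[-search_num:]
--     # a longer (or equal) near-duplicate already present: keep the list as is
--     if any(len(s) >= len(new_str) and _near(s, new_str) for s in window):
--         return draft_list
--     # otherwise drop the shorter near-duplicates and append new_str
--     for s in [s for s in window if len(s) < len(new_str) and _near(new_str, s)]:
--         draft_list.remove(s)
--     draft_list.append(new_str)
--     return draft_list
-- ===== Notes on version B (the rewrite author's own statement) =====
-- stated objective: alternative
-- what changed: The edit distance is computed top-down over the dependency DAG with an explicit worklist stack and a dict memo (cells created on demand, in pop order) instead of A's bottom-up index-filling of a preallocated (n+1)x(m+1) matrix, and A's single accumulating window loop with early return is split into an any() scan for a longer near-duplicate followed by a filter of the shorter ones.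
import Mathlib
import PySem

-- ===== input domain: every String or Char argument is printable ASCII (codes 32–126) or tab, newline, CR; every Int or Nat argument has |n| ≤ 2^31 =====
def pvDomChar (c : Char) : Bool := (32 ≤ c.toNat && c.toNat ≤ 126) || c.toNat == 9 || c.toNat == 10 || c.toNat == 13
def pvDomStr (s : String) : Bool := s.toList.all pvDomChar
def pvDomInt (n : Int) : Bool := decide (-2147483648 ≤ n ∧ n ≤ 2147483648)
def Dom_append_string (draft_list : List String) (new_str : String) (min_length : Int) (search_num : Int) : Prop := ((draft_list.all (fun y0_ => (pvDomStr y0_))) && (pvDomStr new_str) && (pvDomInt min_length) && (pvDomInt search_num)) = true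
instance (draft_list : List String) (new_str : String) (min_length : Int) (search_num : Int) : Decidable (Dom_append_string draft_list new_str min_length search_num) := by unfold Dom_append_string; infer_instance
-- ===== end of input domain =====

-- B computes the edit distance top-down over the dependency DAG with an explicit worklist
-- stack and a dict memo instead of A's bottom-up fill of a preallocated matrix, and splits
-- A's single accumulating window loop into an any-scan plus a filter; equivalence is about
-- the RETURN value (the Python A mutates draft_list in place, and the Python B performs
-- the same mutation).

-- ===== PORT A =====
def levenshtein_A (s1 s2 : List Char) : Int :=
  let n : Nat := s1.length
  let m : Nat := s2.length
  let dp : List (List Int) :=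
    (PySem.List.pyRange 0 ((n : Int) + 1) 1).map (fun _ => List.replicate (m + 1) (0 : Int))
  let dp := (PySem.List.pyRange 0 ((n : Int) + 1) 1).foldl
    (fun dp i => PySem.List.pySetD dp i (PySem.List.pySetD (PySem.List.pyGetD dp i []) 0 i)) dp
  let dp := (PySem.List.pyRange 0 ((m : Int) + 1) 1).foldl
    (fun dp j => PySem.List.pySetD dp 0 (PySem.List.pySetD (PySem.List.pyGetD dp 0 []) j j)) dp
  let dp := (PySem.List.pyRange 1 ((n : Int) + 1) 1).foldl
    (fun dp i =>
      (PySem.List.pyRange 1 ((m : Int) + 1) 1).foldl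
        (fun dp j =>
          PySem.List.pySetD dp i (PySem.List.pySetD (PySem.List.pyGetD dp i []) j
            (min (min (PySem.List.pyGetD (PySem.List.pyGetD dp (i - 1) []) j 0 + 1)
                      (PySem.List.pyGetD (PySem.List.pyGetD dp i []) (j - 1) 0 + 1))
                 (PySem.List.pyGetD (PySem.List.pyGetD dp (i - 1) []) (j - 1) 0 +
                    (if PySem.List.pyGetD s1 (i - 1) ' ' == PySem.List.pyGetD s2 (j - 1) ' '
                     then 0 else 1))))) dp)
    dp
  PySem.List.pyGetD (PySem.List.pyGetD dp (n : Int) []) (m : Int) 0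

-- 'lev <= 0.5*len(s2)': both sides are exact in Python's float, so it is '2*lev <= len(s2)'
def check_duplicate_A (s1 s2 : List Char) : Bool :=
  decide (2 * levenshtein_A (PySem.List.slice s1 none (some (s2.length : Int))) s2 ≤ (s2.length : Int)) ||
  decide (2 * levenshtein_A (PySem.List.slice s1 (some (-(s2.length : Int))) none) s2 ≤ (s2.length : Int))

-- the window loop of A: early return on a longer near-duplicate, else collect removals
def appendLoop_A (draft_list : List String) (ns : String) (ws : List String)
    (toRemove : List String) : List String :=
  match ws with
  | [] =>
      -- 'draft_list.remove(s)' never raises here: every collected s occurs in draft_list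
      (toRemove.foldl (fun acc s => (PySem.List.remove? acc s).getD acc) draft_list) ++ [ns]
  | s :: rest =>
      if (decide (PySem.Str.len s ≥ PySem.Str.len ns)) && check_duplicate_A s.toList ns.toList then
        draft_list
      else if (decide (PySem.Str.len s < PySem.Str.len ns)) && check_duplicate_A ns.toList s.toList then
        appendLoop_A draft_list ns rest (toRemove ++ [s])
      else appendLoop_A draft_list ns rest toRemove

def append_string (draft_list : List String) (new_str : String) (min_length : Int)
    (search_num : Int) : List String :=
  if PySem.Str.len new_str < min_length then draft_list
  else
    let ns := PySem.Str.replace new_str " " ""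
    appendLoop_A draft_list ns (PySem.List.slice draft_list (some (-search_num)) none) []

-- ===== PORT B =====
-- worklist entries are (i, j, ready); potential of one entry, for termination only
def pvF (e : Nat × Nat × Bool) : Nat :=
  if e.2.2 then 9 ^ (e.1 + e.2.1) else 6 * 9 ^ (e.1 + e.2.1)

def pvMeasure (st : List (Nat × Nat × Bool)) : Nat := (st.map pvF).sum

theorem pvMeasure_cons (e : Nat × Nat × Bool) (st : List (Nat × Nat × Bool)) :
    pvMeasure (e :: st) = pvF e + pvMeasure st := by
  simp [pvMeasure]

theorem pvF_pos (e : Nat × Nat × Bool) : 0 < pvF e := by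
  unfold pvF
  split <;> positivity

-- the while loop of B's _lev: pop an entry, memoize it or expand its dependencies
def levGo (s1 s2 : List Char) : List (Nat × Nat × Bool) → PySem.Dict (Nat × Nat) Int →
    PySem.Dict (Nat × Nat) Int
  | [], memo => memo
  | (i, j, ready) :: rest, memo =>
    if (memo.get? (i, j)).isSome then
      levGo s1 s2 rest memo
    else if _hi : i = 0 then
      levGo s1 s2 rest (memo.insert (i, j) (j : Int))
    else if _hj : j = 0 then
      levGo s1 s2 rest (memo.insert (i, j) (i : Int))
    else if _hr : ready then
      levGo s1 s2 rest (memo.insert (i, j)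
        (min (min (memo.getD (i - 1, j) 0 + 1) (memo.getD (i, j - 1) 0 + 1))
             (memo.getD (i - 1, j - 1) 0 +
               (if s1.getD (i - 1) ' ' == s2.getD (j - 1) ' ' then 0 else 1))))
    else
      levGo s1 s2
        ((i - 1, j - 1, false) :: (i, j - 1, false) :: (i - 1, j, false) :: (i, j, true) :: rest)
        memo
  termination_by st _ => pvMeasure st
  decreasing_by
  · simp only [pvMeasure_cons]
    have := pvF_pos (i, j, ready)
    omega
  · simp only [pvMeasure_cons]
    have := pvF_pos (i, j, ready)
    omega
  · simp only [pvMeasure_cons]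
    have := pvF_pos (i, j, ready)
    omega
  · simp only [pvMeasure_cons]
    have := pvF_pos (i, j, ready)
    omega
  · obtain ⟨a, rfl⟩ : ∃ a, i = a + 1 := ⟨i - 1, by omega⟩
    obtain ⟨b, rfl⟩ : ∃ b, j = b + 1 := ⟨j - 1, by omega⟩
    have hr : ready = false := by revert _hr; cases ready <;> simp
    subst hr
    simp only [pvMeasure_cons, pvF, Nat.add_sub_cancel]
    have h1 : (a + 1) + (b + 1) = (a + b) + 2 := by omega
    have h2 : (a + 1) + b = (a + b) + 1 := by omega
    have h3 : a + (b + 1) = (a + b) + 1 := by omega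
    simp only [h1, h2, h3, pow_succ, if_true, if_false, Bool.false_eq_true]
    have h4 : 0 < 9 ^ (a + b) := by positivity
    omega

def lev_B (s1 s2 : List Char) : Int :=
  (levGo s1 s2 [(s1.length, s2.length, false)] PySem.Dict.empty).getD (s1.length, s2.length) 0

def near_B (s1 s2 : List Char) : Bool :=
  decide (2 * lev_B (PySem.List.slice s1 none (some (s2.length : Int))) s2 ≤ (s2.length : Int)) ||
  decide (2 * lev_B (PySem.List.slice s1 (some (-(s2.length : Int))) none) s2 ≤ (s2.length : Int))

def append_string_alt (draft_list : List String) (new_str : String) (min_length : Int)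
    (search_num : Int) : List String :=
  if PySem.Str.len new_str < min_length then draft_list
  else
    let ns := PySem.Str.replace new_str " " ""
    let window := PySem.List.slice draft_list (some (-search_num)) none
    if window.any (fun s => (decide (PySem.Str.len s ≥ PySem.Str.len ns)) && near_B s.toList ns.toList) then
      draft_list
    else
      (window.filter (fun s => (decide (PySem.Str.len s < PySem.Str.len ns)) && near_B ns.toList s.toList)).foldl
        (fun acc s => (PySem.List.remove? acc s).getD acc) draft_list ++ [ns]

-- ===== PRECONDITION & SPEC =====
def Spec_append_string (draft_list : List String) (new_str : String) (min_length : Int) (search_num : Int) (out : List String) : Prop := out = append_string_alt draft_list new_str min_length search_num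
instance (draft_list : List String) (new_str : String) (min_length : Int) (search_num : Int) (out : List String) : Decidable (Spec_append_string draft_list new_str min_length search_num out) := by unfold Spec_append_string; infer_instance

-- ===== CLAIM (what is proved, stated in full; the proofs are below) =====
def Claim_equal_append_string : Prop := ∀ (draft_list : List String) (new_str : String) (min_length : Int) (search_num : Int), Dom_append_string draft_list new_str min_length search_num → Spec_append_string draft_list new_str min_length search_num (append_string draft_list new_str min_length search_num)

-- ===== LEMMAS AND PROOFS =====

-- the Levenshtein recurrence as a pure recursion on prefix lengths (proof-side reference)
def levTD (s1 s2 : List Char) : Nat → Nat → Int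
  | 0, j => (j : Int)
  | i + 1, 0 => ((i + 1 : Nat) : Int)
  | i + 1, j + 1 =>
      min (min (levTD s1 s2 i (j + 1) + 1) (levTD s1 s2 (i + 1) j + 1))
          (levTD s1 s2 i j + (if s1.getD i ' ' == s2.getD j ' ' then 0 else 1))
  termination_by i j => i + j

-- every memo entry is the corresponding levTD value
def pvGood (s1 s2 : List Char) (memo : PySem.Dict (Nat × Nat) Int) : Prop :=
  ∀ p v, memo.get? p = some v → v = levTD s1 s2 p.1 p.2

def pvMemoLE (m1 m2 : PySem.Dict (Nat × Nat) Int) : Prop :=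
  ∀ p v, m1.get? p = some v → m2.get? p = some v

-- the stack is well-formed: the dependencies of every 'ready' entry are memoized or
-- scheduled strictly before it ('seen' = cells of the already processed prefix)
def pvWFS (memo : PySem.Dict (Nat × Nat) Int) (seen : List (Nat × Nat)) :
    List (Nat × Nat × Bool) → Prop
  | [] => True
  | (i, j, b) :: rest =>
      (b = true →
        ((memo.get? (i - 1, j)).isSome ∨ (i - 1, j) ∈ seen) ∧
        ((memo.get? (i, j - 1)).isSome ∨ (i, j - 1) ∈ seen) ∧
        ((memo.get? (i - 1, j - 1)).isSome ∨ (i - 1, j - 1) ∈ seen)) ∧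
      pvWFS memo ((i, j) :: seen) rest

theorem pvWFS_weaken (memo memo' : PySem.Dict (Nat × Nat) Int)
    (st : List (Nat × Nat × Bool)) :
    ∀ (seen seen' : List (Nat × Nat)),
      pvWFS memo seen st → pvMemoLE memo memo' →
      (∀ c ∈ seen, (memo'.get? c).isSome ∨ c ∈ seen') →
      pvWFS memo' seen' st := by
  induction st with
  | nil => intro _ _ _ _ _; trivial
  | cons e rest ih =>
      rintro seen seen' h hle hc
      obtain ⟨i, j, b⟩ := e
      obtain ⟨h1, h2⟩ := h
      refine ⟨?_, ?_⟩
      · intro hb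
        obtain ⟨d1, d2, d3⟩ := h1 hb
        have step : ∀ p : Nat × Nat, (memo.get? p).isSome ∨ p ∈ seen →
            (memo'.get? p).isSome ∨ p ∈ seen' := by
          rintro p (hp | hp)
          · obtain ⟨v, hv⟩ := Option.isSome_iff_exists.mp hp
            exact Or.inl (Option.isSome_iff_exists.mpr ⟨v, hle p v hv⟩)
          · exact hc p hp
        exact ⟨step _ d1, step _ d2, step _ d3⟩
      · refine ih ((i, j) :: seen) ((i, j) :: seen') h2 hle ?_
        intro c hcm
        rw [List.mem_cons] at hcm
        rcases hcm with rfl | hcm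
        · exact Or.inr List.mem_cons_self
        · rcases hc c hcm with h | h
          · exact Or.inl h
          · exact Or.inr (List.mem_cons_of_mem _ h)

-- inserting a fresh key preserves pvMemoLE and the correctness invariant
theorem pvMemoLE_insert (memo : PySem.Dict (Nat × Nat) Int) (k : Nat × Nat) (v : Int)
    (h : memo.get? k = none) : pvMemoLE memo (memo.insert k v) := by
  intro p w hp
  rw [PySem.Dict.get?_insert]
  split
  · rename_i hpk; rw [hpk] at hp; rw [h] at hp; exact absurd hp (by simp)
  · exact hp

theorem pvGood_insert (s1 s2 : List Char) (memo : PySem.Dict (Nat × Nat) Int)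
    (i j : Nat) (v : Int) (hg : pvGood s1 s2 memo) (hv : v = levTD s1 s2 i j) :
    pvGood s1 s2 (memo.insert (i, j) v) := by
  intro p w hp
  rw [PySem.Dict.get?_insert] at hp
  split at hp
  · rename_i hpk
    cases hp
    rw [hpk]
    exact hv
  · exact hg p w hp

-- after popping an entry whose cell the (possibly grown) memo covers, the rest is well-formed
theorem pvWFS_pop (memo memo' : PySem.Dict (Nat × Nat) Int) (c : Nat × Nat)
    (st : List (Nat × Nat × Bool)) (h : pvWFS memo [c] st) (hle : pvMemoLE memo memo')
    (hm : (memo'.get? c).isSome) : pvWFS memo' [] st := by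
  refine pvWFS_weaken memo memo' st [c] [] h hle ?_
  intro x hx
  rw [List.mem_singleton] at hx
  subst hx
  exact Or.inl hm

-- a memo that gains key k at value v has that key
theorem pv_insert_isSome (memo : PySem.Dict (Nat × Nat) Int) (k : Nat × Nat) (v : Int) :
    ((memo.insert k v).get? k).isSome := by
  rw [PySem.Dict.get?_insert_self]
  simp

-- main invariant: levGo keeps the memo correct, only grows it, and memoizes every
-- cell that was on the stack
theorem levGo_spec (s1 s2 : List Char) :
    ∀ (st : List (Nat × Nat × Bool)) (memo : PySem.Dict (Nat × Nat) Int),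
      pvGood s1 s2 memo → pvWFS memo [] st →
      pvGood s1 s2 (levGo s1 s2 st memo) ∧ pvMemoLE memo (levGo s1 s2 st memo) ∧
      ∀ e ∈ st, ((levGo s1 s2 st memo).get? (e.1, e.2.1)).isSome := by
  intro st memo
  induction st, memo using levGo.induct s1 s2 with
  | case1 memo =>
      intro hg _
      rw [levGo]
      exact ⟨hg, fun p v h => h, by simp⟩
  | case2 i j ready rest memo hmem ih =>
      intro hg hwf
      rw [levGo, if_pos hmem]
      obtain ⟨_, hwfr⟩ := hwf
      obtain ⟨g', le', all'⟩ := ih hg (pvWFS_pop memo memo (i, j) rest hwfr (fun p v h => h) hmem)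
      refine ⟨g', le', ?_⟩
      intro e he
      rw [List.mem_cons] at he
      rcases he with rfl | he
      · obtain ⟨v, hv⟩ := Option.isSome_iff_exists.mp hmem
        exact Option.isSome_iff_exists.mpr ⟨v, le' _ v hv⟩
      · exact all' e he
  | case3 j ready rest memo hmem ih =>
      intro hg hwf
      rw [levGo, if_neg hmem, dif_pos rfl]
      have hnone : memo.get? (0, j) = none := by
        cases h : memo.get? (0, j) with
        | none => rfl
        | some v => rw [h] at hmem; simp at hmem
      have hle := pvMemoLE_insert memo (0, j) (j : Int) hnone
      have hg' : pvGood s1 s2 (memo.insert (0, j) (j : Int)) :=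
        pvGood_insert s1 s2 memo 0 j _ hg (by rw [levTD])
      obtain ⟨_, hwfr⟩ := hwf
      obtain ⟨g', le', all'⟩ := ih hg'
        (pvWFS_pop memo _ (0, j) rest hwfr hle (pv_insert_isSome memo _ _))
      refine ⟨g', fun p v h => le' p v (hle p v h), ?_⟩
      intro e he
      rw [List.mem_cons] at he
      rcases he with rfl | he
      · exact Option.isSome_iff_exists.mpr
          ⟨(j : Int), le' _ _ (PySem.Dict.get?_insert_self memo _ _)⟩
      · exact all' e he
  | case4 i ready rest memo hi hmem ih =>
      intro hg hwf
      rw [levGo, if_neg hmem, dif_neg hi, dif_pos rfl]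
      have hnone : memo.get? (i, 0) = none := by
        cases h : memo.get? (i, 0) with
        | none => rfl
        | some v => rw [h] at hmem; simp at hmem
      have hle := pvMemoLE_insert memo (i, 0) (i : Int) hnone
      have hg' : pvGood s1 s2 (memo.insert (i, 0) (i : Int)) := by
        refine pvGood_insert s1 s2 memo i 0 _ hg ?_
        obtain ⟨a, rfl⟩ : ∃ a, i = a + 1 := ⟨i - 1, by omega⟩
        rw [levTD]
      obtain ⟨_, hwfr⟩ := hwf
      obtain ⟨g', le', all'⟩ := ih hg'
        (pvWFS_pop memo _ (i, 0) rest hwfr hle (pv_insert_isSome memo _ _))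
      refine ⟨g', fun p v h => le' p v (hle p v h), ?_⟩
      intro e he
      rw [List.mem_cons] at he
      rcases he with rfl | he
      · exact Option.isSome_iff_exists.mpr
          ⟨(i : Int), le' _ _ (PySem.Dict.get?_insert_self memo _ _)⟩
      · exact all' e he
  | case5 i j rest memo hmem hi hj ih =>
      intro hg hwf
      rw [levGo, if_neg hmem, dif_neg hi, dif_neg hj, dif_pos rfl]
      obtain ⟨hdeps, hwfr⟩ := hwf
      obtain ⟨d1, d2, d3⟩ := hdeps rfl
      have hd1 : (memo.get? (i - 1, j)).isSome := by
        rcases d1 with h | h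
        · exact h
        · simp at h
      have hd2 : (memo.get? (i, j - 1)).isSome := by
        rcases d2 with h | h
        · exact h
        · simp at h
      have hd3 : (memo.get? (i - 1, j - 1)).isSome := by
        rcases d3 with h | h
        · exact h
        · simp at h
      obtain ⟨v1, hv1⟩ := Option.isSome_iff_exists.mp hd1
      obtain ⟨v2, hv2⟩ := Option.isSome_iff_exists.mp hd2
      obtain ⟨v3, hv3⟩ := Option.isSome_iff_exists.mp hd3
      have e1 : memo.getD (i - 1, j) 0 = levTD s1 s2 (i - 1) j := by
        rw [PySem.Dict.getD_eq_get?_getD, hv1]; simpa using hg _ _ hv1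
      have e2 : memo.getD (i, j - 1) 0 = levTD s1 s2 i (j - 1) := by
        rw [PySem.Dict.getD_eq_get?_getD, hv2]; simpa using hg _ _ hv2
      have e3 : memo.getD (i - 1, j - 1) 0 = levTD s1 s2 (i - 1) (j - 1) := by
        rw [PySem.Dict.getD_eq_get?_getD, hv3]; simpa using hg _ _ hv3
      have hnone : memo.get? (i, j) = none := by
        cases h : memo.get? (i, j) with
        | none => rfl
        | some v => rw [h] at hmem; simp at hmem
      set w : Int := min (min (memo.getD (i - 1, j) 0 + 1) (memo.getD (i, j - 1) 0 + 1))
          (memo.getD (i - 1, j - 1) 0 +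
            (if s1.getD (i - 1) ' ' == s2.getD (j - 1) ' ' then 0 else 1)) with hw
      have hle := pvMemoLE_insert memo (i, j) w hnone
      have hg' : pvGood s1 s2 (memo.insert (i, j) w) := by
        refine pvGood_insert s1 s2 memo i j w hg ?_
        obtain ⟨a, rfl⟩ : ∃ a, i = a + 1 := ⟨i - 1, by omega⟩
        obtain ⟨b, rfl⟩ : ∃ b, j = b + 1 := ⟨j - 1, by omega⟩
        rw [hw, e1, e2, e3, levTD]
        simp
      obtain ⟨g', le', all'⟩ := ih hg'
        (pvWFS_pop memo _ (i, j) rest hwfr hle (pv_insert_isSome memo _ _))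
      refine ⟨g', fun p v h => le' p v (hle p v h), ?_⟩
      intro e he
      rw [List.mem_cons] at he
      rcases he with rfl | he
      · exact Option.isSome_iff_exists.mpr ⟨w, le' _ _ (PySem.Dict.get?_insert_self memo _ _)⟩
      · exact all' e he
  | case6 i j ready rest memo hmem hi hj hready ih =>
      intro hg hwf
      rw [levGo, if_neg hmem, dif_neg hi, dif_neg hj, dif_neg hready]
      obtain ⟨_, hwfr⟩ := hwf
      have hwf' : pvWFS memo []
          ((i - 1, j - 1, false) :: (i, j - 1, false) :: (i - 1, j, false) :: (i, j, true) :: rest) := by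
        refine ⟨by simp, ⟨by simp, ⟨by simp, ⟨?_, ?_⟩⟩⟩⟩
        · intro _
          refine ⟨Or.inr ?_, Or.inr ?_, Or.inr ?_⟩ <;> simp
        · refine pvWFS_weaken memo memo rest [(i, j)] _ hwfr (fun p v h => h) ?_
          intro c hc
          rw [List.mem_singleton] at hc
          subst hc
          exact Or.inr (by simp)
      obtain ⟨g', le', all'⟩ := ih hg hwf'
      refine ⟨g', le', ?_⟩
      intro e he
      rw [List.mem_cons] at he
      rcases he with rfl | he
      · exact all' (i, j, true) (by simp)
      · exact all' e (by simp [he])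

-- B's lev equals the pure recursion
theorem lev_B_eq_levTD (s1 s2 : List Char) :
    lev_B s1 s2 = levTD s1 s2 s1.length s2.length := by
  have hg : pvGood s1 s2 PySem.Dict.empty := by
    intro p v h
    rw [PySem.Dict.get?_empty] at h
    exact absurd h (by simp)
  have hwf : pvWFS PySem.Dict.empty [] [(s1.length, s2.length, false)] := ⟨by simp, trivial⟩
  obtain ⟨g', _, all'⟩ := levGo_spec s1 s2 [(s1.length, s2.length, false)] PySem.Dict.empty hg hwf
  have hmem := all' (s1.length, s2.length, false) (by simp)
  obtain ⟨v, hv⟩ := Option.isSome_iff_exists.mp hmem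
  simp only at hv
  unfold lev_B
  rw [PySem.Dict.getD_eq_get?_getD, hv]
  simpa using g' _ _ hv

-- ===== A's matrix fill equals the same recursion, via a per-row characterisation =====

-- small getD/set facts used throughout
theorem pv_getD_set_ne {a : Type} (l : List a) (i j : Nat) (h : i ≠ j) (v d : a) :
    (l.set i v).getD j d = l.getD j d := by
  simp [List.getD, h]

theorem pv_getD_set_self {a : Type} (l : List a) (i : Nat) (h : i < l.length) (v d : a) :
    (l.set i v).getD i d = v := by
  simp [List.getD, h]

theorem pv_getD_append_left {a : Type} (s t : List a) (i : Nat) (h : i < s.length) (d : a) :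
    (s ++ t).getD i d = s.getD i d := by
  simp [List.getD, List.getElem?_append_left h]

theorem pv_set_map_range {a : Type} (L i : Nat) (f : Nat → a) (v : a) (_hi : i < L) :
    ((List.range L).map f).set i v = (List.range L).map (fun k => if k = i then v else f k) := by
  apply List.ext_getElem
  · simp
  · intro k h1 h2
    simp only [List.getElem_set, List.getElem_map, List.getElem_range]
    by_cases hk : i = k
    · simp [hk]
    · rw [if_neg hk, if_neg (fun hh => hk hh.symm)]

-- a loop that writes only row i0, reading rows r and i0, is a set of a 1-D fold
theorem pv_foldl_set2 {b : Type} (l : List b) (i0 r : Nat) (hne : r ≠ i0)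
    (g : List Int → List Int → b → List Int) :
    ∀ (dp : List (List Int)), i0 < dp.length →
      l.foldl (fun dp x => dp.set i0 (g (dp.getD r []) (dp.getD i0 []) x)) dp
        = dp.set i0 (l.foldl (g (dp.getD r [])) (dp.getD i0 [])) := by
  induction l with
  | nil =>
      intro dp h
      simp only [List.foldl_nil]
      rw [List.getD_eq_getElem _ _ h, List.set_getElem_self]
  | cons x xs ih =>
      intro dp h
      simp only [List.foldl_cons]
      rw [ih (dp.set i0 (g (dp.getD r []) (dp.getD i0 []) x)) (by simpa using h)]
      rw [pv_getD_set_ne _ _ _ (Ne.symm hne), pv_getD_set_self _ _ h, List.set_set]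

-- length of an append-building fold
theorem pv_foldl_append_len {b : Type} (l : List b) (e : List Int → b → Int) :
    ∀ cur : List Int, (l.foldl (fun c x => c ++ [e c x]) cur).length = cur.length + l.length := by
  induction l with
  | nil => intro cur; simp
  | cons x xs ih => intro cur; simp [ih]; omega

theorem pv_pyRange0 (c : Nat) :
    PySem.List.pyRange 0 ((c : Int) + 1) 1 = (List.range (c + 1)).map (fun (k : Nat) => (k : Int)) := by
  rw [PySem.List.pyRange_one]
  have h : ((c : Int) + 1 - 0).toNat = c + 1 := by omega
  rw [h]
  apply List.map_congr_left
  intro a _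
  omega

theorem pv_pyRange1 (c : Nat) :
    PySem.List.pyRange 1 ((c : Int) + 1) 1
      = (List.range c).map (fun (k : Nat) => ((k + 1 : Nat) : Int)) := by
  rw [PySem.List.pyRange_one]
  have h : ((c : Int) + 1 - 1).toNat = c := by omega
  rw [h]
  apply List.map_congr_left
  intro a _
  push_cast
  ring

def pvRow0 (m : Nat) : List Int := PySem.List.pyRange 0 ((m : Int) + 1) 1

theorem pvRow0_eq (m : Nat) : pvRow0 m = (List.range (m + 1)).map (fun (k : Nat) => (k : Int)) :=
  pv_pyRange0 m

-- proof-side rolling-row builder used only to name A's row computation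
def pvLevRow (prev : List Int) (c1 : Char) (s2 : List Char) (i : Int) : List Int :=
  (PySem.List.enumerate s2 1).foldl
    (fun cur jc =>
      cur ++ [min (min (PySem.List.pyGetD prev jc.1 0 + 1)
                       (PySem.List.pyGetD cur (jc.1 - 1) 0 + 1))
                  (PySem.List.pyGetD prev (jc.1 - 1) 0 + (if c1 == jc.2 then 0 else 1))])
    [i]

-- the rows of the computation, row k = processing the first k characters of s1
def pvBRow (s1 s2 : List Char) (k : Nat) : List Int :=
  (PySem.List.enumerate (s1.take k) 1).foldl
    (fun prev ic => pvLevRow prev ic.2 s2 ic.1) (pvRow0 s2.length)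

theorem pvBRow_zero (s1 s2 : List Char) : pvBRow s1 s2 0 = pvRow0 s2.length := by
  simp [pvBRow]

theorem pvBRow_succ (s1 s2 : List Char) (k : Nat) (hk : k < s1.length) :
    pvBRow s1 s2 (k + 1) = pvLevRow (pvBRow s1 s2 k) s1[k] s2 ((k + 1 : Nat) : Int) := by
  unfold pvBRow
  rw [List.take_add_one, List.getElem?_eq_getElem hk]
  simp only [Option.toList_some]
  rw [PySem.List.enumerate_append, List.foldl_append]
  rw [PySem.List.enumerate_cons, PySem.List.enumerate_nil]
  simp only [List.foldl_cons, List.foldl_nil, List.length_take]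
  congr 2
  push_cast
  omega

-- the literal inner-loop body of A's port, named for rewriting
def pvABody (s1 s2 : List Char) (i : Int) (dp : List (List Int)) (j : Int) : List (List Int) :=
  PySem.List.pySetD dp i (PySem.List.pySetD (PySem.List.pyGetD dp i []) j
    (min (min (PySem.List.pyGetD (PySem.List.pyGetD dp (i - 1) []) j 0 + 1)
              (PySem.List.pyGetD (PySem.List.pyGetD dp i []) (j - 1) 0 + 1))
         (PySem.List.pyGetD (PySem.List.pyGetD dp (i - 1) []) (j - 1) 0 +
            (if PySem.List.pyGetD s1 (i - 1) ' ' == PySem.List.pyGetD s2 (j - 1) ' '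
             then 0 else 1))))

-- inner loop over one row, list level: A's set-filling equals the append-building fold
theorem pv_inner_aux (s2 : List Char) (c1 : Char) (R : List Int) (i : Int) :
    ∀ t, t ≤ s2.length →
    (List.range t).foldl
      (fun cur k => cur.set (k + 1)
        (min (min (R.getD (k + 1) 0 + 1) (cur.getD k 0 + 1))
             (R.getD k 0 + (if c1 == s2.getD k ' ' then 0 else 1))))
      (i :: List.replicate s2.length 0)
    = (PySem.List.enumerate (s2.take t) 1).foldl
        (fun cur jc =>
          cur ++ [min (min (PySem.List.pyGetD R jc.1 0 + 1)
                           (PySem.List.pyGetD cur (jc.1 - 1) 0 + 1))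
                      (PySem.List.pyGetD R (jc.1 - 1) 0 + (if c1 == jc.2 then 0 else 1))])
        [i]
      ++ List.replicate (s2.length - t) 0 := by
  intro t
  induction t with
  | zero =>
      intro _
      simp
  | succ t ih =>
      intro ht
      have ht' : t ≤ s2.length := by omega
      have htlt : t < s2.length := by omega
      rw [List.range_succ, List.foldl_append, ih ht']
      simp only [List.foldl_cons, List.foldl_nil]
      have hlen : ((PySem.List.enumerate (s2.take t) 1).foldl
          (fun cur jc =>
            cur ++ [min (min (PySem.List.pyGetD R jc.1 0 + 1)
                             (PySem.List.pyGetD cur (jc.1 - 1) 0 + 1))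
                        (PySem.List.pyGetD R (jc.1 - 1) 0 + (if c1 == jc.2 then 0 else 1))])
          [i]).length = t + 1 := by
        rw [pv_foldl_append_len]
        simp [PySem.List.length_enumerate]
        omega
      set built := (PySem.List.enumerate (s2.take t) 1).foldl
          (fun cur jc =>
            cur ++ [min (min (PySem.List.pyGetD R jc.1 0 + 1)
                             (PySem.List.pyGetD cur (jc.1 - 1) 0 + 1))
                        (PySem.List.pyGetD R (jc.1 - 1) 0 + (if c1 == jc.2 then 0 else 1))])
          [i] with hbuilt
      -- left side: the set hits position 0 of the replicate block
      rw [List.set_append, if_neg (by omega)]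
      have hrep : List.replicate (s2.length - t) (0 : Int)
          = (0 : Int) :: List.replicate (s2.length - (t + 1)) 0 := by
        have h2 : s2.length - t = (s2.length - (t + 1)) + 1 := by omega
        rw [h2, List.replicate_succ]
      rw [hrep]
      have hidx : t + 1 - built.length = 0 := by omega
      rw [hidx]
      simp only [List.set_cons_zero]
      -- right side: one more enumerate step
      rw [List.take_add_one, List.getElem?_eq_getElem htlt]
      simp only [Option.toList_some]
      rw [PySem.List.enumerate_append, PySem.List.enumerate_cons, PySem.List.enumerate_nil,
        List.foldl_append]
      simp only [List.foldl_cons, List.foldl_nil, List.length_take]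
      rw [← hbuilt]
      have hmin : min t s2.length = t := by omega
      rw [hmin]
      have hcast : (1 : Int) + (t : Int) = ((t + 1 : Nat) : Int) := by push_cast; ring
      rw [hcast]
      have hc1 : ((t + 1 : Nat) : Int) - 1 = ((t : Nat) : Int) := by push_cast; ring
      rw [hc1, PySem.List.pyGetD_natCast, PySem.List.pyGetD_natCast, PySem.List.pyGetD_natCast]
      rw [pv_getD_append_left _ _ _ (by omega), List.append_assoc]
      simp only [List.singleton_append]
      rw [List.getD_eq_getElem _ _ htlt]

-- A's 2-D inner loop is a set of the row computation
theorem pv_inner2D (s1 s2 : List Char) (i0 : Nat) (h1 : 1 ≤ i0) (hi : i0 < s1.length + 1)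
    (F : Nat → List Int) (hFi : F i0 = ((i0 : Int) :: List.replicate s2.length 0)) :
    (PySem.List.pyRange 1 ((s2.length : Int) + 1) 1).foldl (pvABody s1 s2 (i0 : Int))
      ((List.range (s1.length + 1)).map F)
    = ((List.range (s1.length + 1)).map F).set i0
        (pvLevRow (F (i0 - 1)) (s1.getD (i0 - 1) ' ') s2 (i0 : Int)) := by
  rw [pv_pyRange1 s2.length, List.foldl_map]
  have hbody : ∀ (dp : List (List Int)) (k : Nat),
      pvABody s1 s2 (i0 : Int) dp ((k + 1 : Nat) : Int)
        = dp.set i0 ((fun (R cur : List Int) (k : Nat) => cur.set (k + 1)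
            (min (min (R.getD (k + 1) 0 + 1) (cur.getD k 0 + 1))
                 (R.getD k 0 + (if s1.getD (i0 - 1) ' ' == s2.getD k ' ' then 0 else 1))))
            (dp.getD (i0 - 1) []) (dp.getD i0 []) k) := by
    intro dp k
    unfold pvABody
    have e1 : ((k + 1 : Nat) : Int) - 1 = ((k : Nat) : Int) := by push_cast; ring
    have e2 : (i0 : Int) - 1 = ((i0 - 1 : Nat) : Int) := by
      push_cast [Nat.cast_sub h1]
      ring
    rw [e1, e2]
    simp only [PySem.List.pyGetD_natCast, PySem.List.pySetD_natCast]
  simp only [hbody]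
  rw [pv_foldl_set2 (List.range s2.length) i0 (i0 - 1) (by omega)
    (fun (R cur : List Int) (k : Nat) => cur.set (k + 1)
      (min (min (R.getD (k + 1) 0 + 1) (cur.getD k 0 + 1))
           (R.getD k 0 + (if s1.getD (i0 - 1) ' ' == s2.getD k ' ' then 0 else 1))))
    ((List.range (s1.length + 1)).map F) (by simpa using hi)]
  rw [PySem.List.getD_map_range _ _ _ _ (by omega), PySem.List.getD_map_range _ _ _ _ hi, hFi]
  rw [pv_inner_aux s2 (s1.getD (i0 - 1) ' ') (F (i0 - 1)) (i0 : Int) s2.length le_rfl]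
  rw [List.take_length]
  simp only [Nat.sub_self, List.replicate_zero, List.append_nil]
  rfl

-- phases of A's levenshtein
theorem pv_phase1 (n m : Nat) :
    (PySem.List.pyRange 0 ((n : Int) + 1) 1).map (fun _ => List.replicate (m + 1) (0 : Int))
      = (List.range (n + 1)).map (fun _ => List.replicate (m + 1) (0 : Int)) := by
  rw [pv_pyRange0, List.map_map]
  rfl

theorem pv_phase2_aux (n m : Nat) :
    ∀ t, t ≤ n + 1 →
    ((List.range t).map (fun (k : Nat) => (k : Int))).foldl
      (fun dp i => PySem.List.pySetD dp i (PySem.List.pySetD (PySem.List.pyGetD dp i []) 0 i))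
      ((List.range (n + 1)).map (fun _ => List.replicate (m + 1) (0 : Int)))
    = (List.range (n + 1)).map
        (fun (k : Nat) => if k < t then ((k : Int) :: List.replicate m 0) else List.replicate (m + 1) 0) := by
  intro t
  induction t with
  | zero =>
      intro _
      simp
  | succ t ih =>
      intro ht
      rw [show List.range (t + 1) = List.range t ++ [t] from List.range_succ,
        List.map_append, List.foldl_append, ih (by omega)]
      simp only [List.map_cons, List.map_nil, List.foldl_cons, List.foldl_nil]
      rw [PySem.List.pyGetD_natCast, PySem.List.pySetD_natCast]
      rw [PySem.List.getD_map_range _ _ _ _ (by omega), if_neg (by omega)]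
      have hset : PySem.List.pySetD (List.replicate (m + 1) (0 : Int)) 0 (t : Int)
          = ((t : Int) :: List.replicate m 0) := by
        rw [show ((0 : Int)) = ((0 : Nat) : Int) by norm_num, PySem.List.pySetD_natCast,
          List.replicate_succ, List.set_cons_zero]
      rw [hset, pv_set_map_range _ _ _ _ (by omega)]
      apply List.map_congr_left
      intro a ha
      simp only [List.mem_range] at ha
      rcases Nat.lt_trichotomy a t with h | h | h
      · rw [if_neg (by omega), if_pos h, if_pos (by omega)]
      · subst h
        rw [if_pos rfl, if_pos (by omega)]
      · rw [if_neg (by omega), if_neg (by omega), if_neg (by omega)]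

theorem pv_phase2 (n m : Nat) :
    (PySem.List.pyRange 0 ((n : Int) + 1) 1).foldl
      (fun dp i => PySem.List.pySetD dp i (PySem.List.pySetD (PySem.List.pyGetD dp i []) 0 i))
      ((List.range (n + 1)).map (fun _ => List.replicate (m + 1) (0 : Int)))
    = (List.range (n + 1)).map (fun (k : Nat) => ((k : Int) :: List.replicate m 0)) := by
  rw [pv_pyRange0, pv_phase2_aux n m (n + 1) le_rfl]
  apply List.map_congr_left
  intro a ha
  simp only [List.mem_range] at ha
  rw [if_pos ha]

theorem pv_row_aux (m : Nat) :
    ∀ t, t ≤ m + 1 →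
    ((List.range t).map (fun (k : Nat) => (k : Int))).foldl
      (fun r j => PySem.List.pySetD r j j) (List.replicate (m + 1) (0 : Int))
    = (List.range (m + 1)).map (fun (k : Nat) => if k < t then (k : Int) else 0) := by
  intro t
  induction t with
  | zero =>
      intro _
      simp [List.map_const']
  | succ t ih =>
      intro ht
      rw [show List.range (t + 1) = List.range t ++ [t] from List.range_succ,
        List.map_append, List.foldl_append, ih (by omega)]
      simp only [List.map_cons, List.map_nil, List.foldl_cons, List.foldl_nil]
      rw [PySem.List.pySetD_natCast, pv_set_map_range _ _ _ _ (by omega)]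
      apply List.map_congr_left
      intro a ha
      simp only [List.mem_range] at ha
      rcases Nat.lt_trichotomy a t with h | h | h
      · rw [if_neg (by omega), if_pos h, if_pos (by omega)]
      · subst h
        rw [if_pos rfl, if_pos (by omega)]
      · rw [if_neg (by omega), if_neg (by omega), if_neg (by omega)]

theorem pv_phase3 (n m : Nat) :
    (PySem.List.pyRange 0 ((m : Int) + 1) 1).foldl
      (fun dp j => PySem.List.pySetD dp 0 (PySem.List.pySetD (PySem.List.pyGetD dp 0 []) j j))
      ((List.range (n + 1)).map (fun (k : Nat) => ((k : Int) :: List.replicate m 0)))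
    = (List.range (n + 1)).map
        (fun (k : Nat) => if k = 0 then pvRow0 m else ((k : Int) :: List.replicate m 0)) := by
  have hbody : ∀ (dp : List (List Int)) (j : Int),
      PySem.List.pySetD dp 0 (PySem.List.pySetD (PySem.List.pyGetD dp 0 []) j j)
        = dp.set 0 ((fun (R cur : List Int) (j : Int) => PySem.List.pySetD cur j j)
            (dp.getD 1 []) (dp.getD 0 []) j) := by
    intro dp j
    rw [PySem.List.pyGetD_zero]
    rw [show ((0 : Int)) = ((0 : Nat) : Int) by norm_num, PySem.List.pySetD_natCast]
  simp only [hbody]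
  rw [pv_foldl_set2 (PySem.List.pyRange 0 ((m : Int) + 1) 1) 0 1 (by omega)
      (fun (R cur : List Int) (j : Int) => PySem.List.pySetD cur j j) _ (by simp)]
  rw [PySem.List.getD_map_range _ _ _ _ (by omega)]
  rw [show (((0 : Nat) : Int) :: List.replicate m 0) = List.replicate (m + 1) (0 : Int) by
    rw [List.replicate_succ]; norm_num]
  rw [pv_pyRange0, pv_row_aux m (m + 1) le_rfl]
  rw [show (List.range (m + 1)).map (fun (k : Nat) => if k < m + 1 then (k : Int) else 0)
        = pvRow0 m from by
    rw [pvRow0_eq]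
    apply List.map_congr_left
    intro a ha
    simp only [List.mem_range] at ha
    rw [if_pos (by omega)]]
  rw [pv_set_map_range _ _ _ _ (by omega)]

theorem pv_phase4_aux (s1 s2 : List Char) :
    ∀ t, t ≤ s1.length →
    ((List.range t).map (fun (k : Nat) => ((k + 1 : Nat) : Int))).foldl
      (fun dp i => (PySem.List.pyRange 1 ((s2.length : Int) + 1) 1).foldl (pvABody s1 s2 i) dp)
      ((List.range (s1.length + 1)).map
        (fun (k : Nat) => if k = 0 then pvRow0 s2.length else ((k : Int) :: List.replicate s2.length 0)))
    = (List.range (s1.length + 1)).map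
        (fun (k : Nat) => if k ≤ t then pvBRow s1 s2 k else ((k : Int) :: List.replicate s2.length 0)) := by
  intro t
  induction t with
  | zero =>
      intro _
      simp only [List.range_zero, List.map_nil, List.foldl_nil]
      apply List.map_congr_left
      intro a _
      by_cases h : a = 0
      · subst h
        rw [if_pos rfl, if_pos (by omega), pvBRow_zero]
      · rw [if_neg h, if_neg (by omega)]
  | succ t ih =>
      intro ht
      rw [show List.range (t + 1) = List.range t ++ [t] from List.range_succ,
        List.map_append, List.foldl_append, ih (by omega)]
      simp only [List.map_cons, List.map_nil, List.foldl_cons, List.foldl_nil]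
      rw [pv_inner2D s1 s2 (t + 1) (by omega) (by omega) _ (by rw [if_neg (by omega)])]
      simp only [Nat.add_sub_cancel]
      rw [if_pos (le_refl t)]
      have hchar : s1.getD t ' ' = s1[t]'(by omega) := List.getD_eq_getElem _ _ (by omega)
      rw [hchar, ← pvBRow_succ s1 s2 t (by omega)]
      rw [pv_set_map_range _ _ _ _ (by omega)]
      apply List.map_congr_left
      intro a ha
      simp only [List.mem_range] at ha
      by_cases h : a = t + 1
      · subst h
        rw [if_pos rfl, if_pos (by omega)]
      · rcases Nat.lt_or_ge a (t + 1) with h2 | h2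
        · rw [if_neg h, if_pos (by omega), if_pos (by omega)]
        · rw [if_neg h, if_neg (by omega), if_neg (by omega)]

theorem pv_phase4 (s1 s2 : List Char) :
    (PySem.List.pyRange 1 ((s1.length : Int) + 1) 1).foldl
      (fun dp i => (PySem.List.pyRange 1 ((s2.length : Int) + 1) 1).foldl (pvABody s1 s2 i) dp)
      ((List.range (s1.length + 1)).map
        (fun (k : Nat) => if k = 0 then pvRow0 s2.length else ((k : Int) :: List.replicate s2.length 0)))
    = (List.range (s1.length + 1)).map (pvBRow s1 s2) := by
  rw [pv_pyRange1 s1.length, pv_phase4_aux s1 s2 s1.length le_rfl]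
  apply List.map_congr_left
  intro a ha
  simp only [List.mem_range] at ha
  rw [if_pos (by omega)]

-- each row of A's table is the row of levTD values
theorem pvLevRow_spec (s1 s2 : List Char) (k : Nat) (hk : k < s1.length) :
    pvLevRow ((List.range (s2.length + 1)).map (fun j => levTD s1 s2 k j)) (s1[k]) s2
        ((k + 1 : Nat) : Int)
      = (List.range (s2.length + 1)).map (fun j => levTD s1 s2 (k + 1) j) := by
  unfold pvLevRow
  have main : ∀ t, t ≤ s2.length →
      (PySem.List.enumerate (s2.take t) 1).foldl
        (fun cur jc =>
          cur ++ [min (min (PySem.List.pyGetD ((List.range (s2.length + 1)).map (fun j => levTD s1 s2 k j)) jc.1 0 + 1)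
                           (PySem.List.pyGetD cur (jc.1 - 1) 0 + 1))
                      (PySem.List.pyGetD ((List.range (s2.length + 1)).map (fun j => levTD s1 s2 k j)) (jc.1 - 1) 0 +
                        (if s1[k] == jc.2 then 0 else 1))])
        [((k + 1 : Nat) : Int)]
      = (List.range (t + 1)).map (fun j => levTD s1 s2 (k + 1) j) := by
    intro t
    induction t with
    | zero =>
        intro _
        simp [levTD]
    | succ t ih =>
        intro ht
        have htlt : t < s2.length := by omega
        rw [List.take_add_one, List.getElem?_eq_getElem htlt]
        simp only [Option.toList_some]
        rw [PySem.List.enumerate_append, PySem.List.enumerate_cons, PySem.List.enumerate_nil,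
          List.foldl_append]
        simp only [List.foldl_cons, List.foldl_nil, List.length_take]
        rw [ih (by omega)]
        have hmin : min t s2.length = t := by omega
        rw [hmin]
        have hcast : (1 : Int) + (t : Int) = ((t + 1 : Nat) : Int) := by push_cast; ring
        rw [hcast]
        have hc1 : ((t + 1 : Nat) : Int) - 1 = ((t : Nat) : Int) := by push_cast; ring
        rw [hc1, PySem.List.pyGetD_natCast, PySem.List.pyGetD_natCast, PySem.List.pyGetD_natCast]
        rw [PySem.List.getD_map_range _ _ _ _ (by omega),
          PySem.List.getD_map_range _ _ _ _ (by omega),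
          PySem.List.getD_map_range _ _ _ _ (by omega)]
        rw [show List.range (t + 1 + 1) = List.range (t + 1) ++ [t + 1] from List.range_succ,
          List.map_append]
        simp only [List.map_cons, List.map_nil]
        congr 1
        rw [levTD]
        have hs1 : s1.getD k ' ' = s1[k] := List.getD_eq_getElem _ _ hk
        have hs2 : s2.getD t ' ' = s2[t] := List.getD_eq_getElem _ _ htlt
        rw [hs1, hs2]
  have := main s2.length le_rfl
  rw [List.take_length] at this
  exact this

theorem pvBRow_spec (s1 s2 : List Char) :
    ∀ k, k ≤ s1.length →
      pvBRow s1 s2 k = (List.range (s2.length + 1)).map (fun j => levTD s1 s2 k j) := by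
  intro k
  induction k with
  | zero =>
      intro _
      rw [pvBRow_zero, pvRow0_eq]
      apply List.map_congr_left
      intro a _
      rw [levTD]
  | succ k ih =>
      intro hk
      rw [pvBRow_succ s1 s2 k (by omega), ih (by omega), pvLevRow_spec s1 s2 k (by omega)]

-- A's levenshtein equals the pure recursion, hence equals B's memoized computation
theorem pv_lev_eq (s1 s2 : List Char) : levenshtein_A s1 s2 = lev_B s1 s2 := by
  have hA : levenshtein_A s1 s2 = PySem.List.pyGetD (PySem.List.pyGetD
      ((PySem.List.pyRange 1 ((s1.length : Int) + 1) 1).foldl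
        (fun dp i => (PySem.List.pyRange 1 ((s2.length : Int) + 1) 1).foldl (pvABody s1 s2 i) dp)
        ((PySem.List.pyRange 0 ((s2.length : Int) + 1) 1).foldl
          (fun dp j => PySem.List.pySetD dp 0 (PySem.List.pySetD (PySem.List.pyGetD dp 0 []) j j))
          ((PySem.List.pyRange 0 ((s1.length : Int) + 1) 1).foldl
            (fun dp i => PySem.List.pySetD dp i (PySem.List.pySetD (PySem.List.pyGetD dp i []) 0 i))
            ((PySem.List.pyRange 0 ((s1.length : Int) + 1) 1).map
              (fun _ => List.replicate (s2.length + 1) (0 : Int))))))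
      (s1.length : Int) []) (s2.length : Int) 0 := rfl
  rw [hA, pv_phase1, pv_phase2, pv_phase3, pv_phase4]
  simp only [PySem.List.pyGetD_natCast]
  rw [PySem.List.getD_map_range _ _ _ _ (by omega)]
  rw [pvBRow_spec s1 s2 s1.length le_rfl]
  rw [PySem.List.getD_map_range _ _ _ _ (by omega)]
  rw [lev_B_eq_levTD]

theorem pv_near_eq (s1 s2 : List Char) : check_duplicate_A s1 s2 = near_B s1 s2 := by
  unfold check_duplicate_A near_B
  simp only [pv_lev_eq]

-- A's window loop equals B's any/filter decomposition
theorem pv_loop_eq (dl : List String) (ns : String) :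
    ∀ (ws acc : List String),
      appendLoop_A dl ns ws acc
        = if ws.any (fun s => (decide (PySem.Str.len s ≥ PySem.Str.len ns)) && near_B s.toList ns.toList)
          then dl
          else ((acc ++ ws.filter (fun s => (decide (PySem.Str.len s < PySem.Str.len ns)) && near_B ns.toList s.toList)).foldl
                  (fun acc s => (PySem.List.remove? acc s).getD acc) dl) ++ [ns] := by
  intro ws
  induction ws with
  | nil =>
      intro acc
      simp [appendLoop_A]
  | cons s rest ih =>
      intro acc
      rw [appendLoop_A]
      simp only [pv_near_eq, List.any_cons, List.filter_cons]
      by_cases h1 : (decide (PySem.Str.len s ≥ PySem.Str.len ns) && near_B s.toList ns.toList) = true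
      · rw [if_pos h1, h1]
        simp
      · rw [if_neg h1, Bool.eq_false_iff.mpr h1 ]
        simp only [Bool.false_or]
        by_cases h2 : (decide (PySem.Str.len s < PySem.Str.len ns) && near_B ns.toList s.toList) = true
        · rw [if_pos h2, if_pos h2, ih (acc ++ [s])]
          rw [List.append_assoc, List.singleton_append]
        · rw [if_neg h2, if_neg h2, ih acc]

-- ===== VERDICT (by name: the statement is the Claim_ definition above) =====
theorem append_string_spec : Claim_equal_append_string := by
  intro draft_list new_str min_length search_num _
  unfold Spec_append_string
  simp only [append_string, append_string_alt]
  by_cases h : PySem.Str.len new_str < min_length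
  · rw [if_pos h, if_pos h]
  · rw [if_neg h, if_neg h, pv_loop_eq]
    simp only [List.nil_append]
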